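-- pv_equiv track=rewrite | github.com/DabrowskiFr/Kairos | scripts/fix_odoc_docs.py | skip_header_comments
-- ===== SOURCE A (Python) =====
-- def skip_header_comments(text: str) -> int:
--     i = 0
--     n = len(text)
--     while i < n and text[i].isspace():
--         i += 1
--     while text.startswith("(*", i) and not text.startswith("(**", i):
--         j = text.find("*)", i + 2)
--         if j < 0:
--             return i
--         i = j + 2
--         while i < n and text[i].isspace():
--             i += 1
--     return i
-- ===== SOURCE B (Python) =====
-- def skip_header_comments(text: str) -> int:
--     # Recursive, suffix-based: consumed(rest) = how many chars of `rest` belong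
--     # to the header (whitespace via lstrip, then optionally one (* *) comment
--     # and recurse); the result is built bottom-up as a sum of segment lengths.
--     def consumed(rest: str) -> int:
--         stripped = rest.lstrip()
--         ws = len(rest) - len(stripped)
--         if stripped.startswith("(*") and not stripped.startswith("(**"):
--             j = stripped.find("*)", 2)
--             if j < 0:
--                 return ws
--             return ws + j + 2 + consumed(stripped[j + 2:])
--         return ws
--     return consumed(text)
-- ===== Notes on version B (the rewrite author's own statement) =====
-- stated objective: idiomatic
-- what changed: Replaced A's index-threading triple loop by a recursive suffix-based decomposition: each step lstrip()s the remaining suffix and optionally consumes one comment, and the index is reconstructed bottom-up as a sum of consumed segment lengths instead of a running index.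
import Mathlib
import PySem

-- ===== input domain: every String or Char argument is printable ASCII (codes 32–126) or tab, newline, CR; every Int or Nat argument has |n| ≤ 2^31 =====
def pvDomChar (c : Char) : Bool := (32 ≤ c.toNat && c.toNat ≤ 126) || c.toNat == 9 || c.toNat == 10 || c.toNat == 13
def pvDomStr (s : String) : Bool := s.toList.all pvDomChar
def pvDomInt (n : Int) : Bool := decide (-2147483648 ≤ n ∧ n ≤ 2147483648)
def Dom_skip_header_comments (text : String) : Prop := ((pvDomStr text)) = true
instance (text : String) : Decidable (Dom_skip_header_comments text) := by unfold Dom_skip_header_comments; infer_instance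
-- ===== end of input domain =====

-- B replaces A's index-threading loops by a recursive suffix-based decomposition
-- (lstrip the suffix, consume one comment, recurse; index = sum of segment lengths);
-- objective: idiomatic, same cost.

-- ===== PORT A =====
-- A's `while i < n and text[i].isspace(): i += 1`, on the remaining suffix:
-- returns (number of chars skipped, remaining suffix).
def pvSkipWs : List Char → Nat × List Char
  | [] => (0, [])
  | c :: cs =>
    if PySem.Chars.isspace c then
      let p := pvSkipWs cs
      (p.1 + 1, p.2)
    else (0, c :: cs)

theorem pvSkipWs_len (l : List Char) : (pvSkipWs l).2.length ≤ l.length := by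
  induction l with
  | nil => simp [pvSkipWs]
  | cons c cs ih =>
    simp only [pvSkipWs]
    split
    · simp; omega
    · simp

-- A's outer `while text.startswith("(*", i) and not text.startswith("(**", i)` loop,
-- threading the running index i over the suffix at i (whitespace-stripped on entry).
def pvALoop : List Char → Nat → Nat
  | '(' :: '*' :: '*' :: _, i => i
  | '(' :: '*' :: tl, i =>
    if PySem.Chars.find tl ['*', ')'] < 0 then i
    else pvALoop (pvSkipWs (tl.drop ((PySem.Chars.find tl ['*', ')']).toNat + 2))).2
      (i + (PySem.Chars.find tl ['*', ')']).toNat + 4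
         + (pvSkipWs (tl.drop ((PySem.Chars.find tl ['*', ')']).toNat + 2))).1)
  | _, i => i
termination_by l _ => l.length
decreasing_by
  have h := pvSkipWs_len (tl.drop ((PySem.Chars.find tl ['*', ')']).toNat + 2))
  have h2 := List.length_drop (l := tl) (i := (PySem.Chars.find tl ['*', ')']).toNat + 2)
  simp at *
  omega

def skip_header_comments (text : String) : Int :=
  let p := pvSkipWs text.toList
  (pvALoop p.2 p.1 : Int)

-- ===== PORT B =====
-- B's recursive helper `consumed(rest)`: lstrip (= dropWhile isspace on this ASCII
-- domain), then if the stripped suffix opens a non-doc comment with a terminator,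
-- consume through "*)" and recurse on what follows; result is a bottom-up sum.
-- `stripped.find("*)", 2)` returns the absolute index; searching tl = stripped.drop 2
-- gives that index minus 2 (so "+ j + 2" becomes "+ j.toNat + 4" here).
def pvBConsume (rest : List Char) : Nat :=
  let stripped := rest.dropWhile PySem.Chars.isspace
  let ws := rest.length - stripped.length
  match h : stripped with
  | '(' :: '*' :: '*' :: _ => ws
  | '(' :: '*' :: tl =>
    let j := PySem.Chars.find tl ['*', ')']
    if j < 0 then ws
    else ws + j.toNat + 4 + pvBConsume (tl.drop (j.toNat + 2))
  | _ => ws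
termination_by rest.length
decreasing_by
  have h1 := List.length_dropWhile_le (p := PySem.Chars.isspace) (l := rest)
  have h3 : (rest.dropWhile PySem.Chars.isspace).length = tl.length + 2 := by
    show stripped.length = _; rw [h]; simp
  simp
  omega


def skip_header_comments_alt (text : String) : Int :=
  (pvBConsume text.toList : Int)

-- ===== PRECONDITION & SPEC =====
def Spec_skip_header_comments (text : String) (out : Int) : Prop := out = skip_header_comments_alt text
instance (text : String) (out : Int) : Decidable (Spec_skip_header_comments text out) := by unfold Spec_skip_header_comments; infer_instance

-- ===== CLAIM (what is proved, stated in full; the proofs are below) =====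
def Claim_equal_skip_header_comments : Prop := ∀ (text : String), Dom_skip_header_comments text → Spec_skip_header_comments text (skip_header_comments text)

-- ===== LEMMAS AND PROOFS =====
-- A's whitespace loop IS dropWhile with the count of dropped characters.
theorem pvSkipWs_eq (l : List Char) :
    pvSkipWs l = (l.length - (l.dropWhile PySem.Chars.isspace).length,
                  l.dropWhile PySem.Chars.isspace) := by
  induction l with
  | nil => simp [pvSkipWs]
  | cons c cs ih =>
    simp only [pvSkipWs, List.dropWhile]
    by_cases h : PySem.Chars.isspace c
    · have := List.length_dropWhile_le (p := PySem.Chars.isspace) (l := cs)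
      simp [h, ih]
      omega
    · simp [h]

theorem pvALoop_eq_consume (l : List Char) :
    ∀ i : Nat, pvALoop (pvSkipWs l).2 (i + (pvSkipWs l).1) = i + pvBConsume l := by
  fun_induction pvBConsume l with
  | case1 rest stripped ws tail h =>
    intro i
    have h' : List.dropWhile PySem.Chars.isspace rest = '(' :: '*' :: '*' :: tail := h
    rw [pvSkipWs_eq]
    show pvALoop (List.dropWhile PySem.Chars.isspace rest)
        (i + (rest.length - (List.dropWhile PySem.Chars.isspace rest).length,
              List.dropWhile PySem.Chars.isspace rest).1)
      = i + (rest.length - (List.dropWhile PySem.Chars.isspace rest).length)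
    rw [h']
    simp [pvALoop]
  | case2 rest stripped ws tl hne h j hjlt =>
    intro i
    have h' : List.dropWhile PySem.Chars.isspace rest = '(' :: '*' :: tl := h
    rw [pvSkipWs_eq]
    show pvALoop (List.dropWhile PySem.Chars.isspace rest)
        (i + (rest.length - (List.dropWhile PySem.Chars.isspace rest).length,
              List.dropWhile PySem.Chars.isspace rest).1)
      = i + (rest.length - (List.dropWhile PySem.Chars.isspace rest).length)
    rw [h']
    rw [pvALoop.eq_def]
    split
    · rfl
    · rename_i tl' i' heq
      simp only [List.cons.injEq, true_and] at heq
      rw [← heq]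
      rw [if_pos (by exact_mod_cast hjlt)]
    · rfl
  | case3 rest stripped ws tl hne h j hjge ih =>
    intro i
    have h' : List.dropWhile PySem.Chars.isspace rest = '(' :: '*' :: tl := h
    rw [pvSkipWs_eq]
    show pvALoop (List.dropWhile PySem.Chars.isspace rest)
        (i + (rest.length - (List.dropWhile PySem.Chars.isspace rest).length,
              List.dropWhile PySem.Chars.isspace rest).1)
      = i + (rest.length - (List.dropWhile PySem.Chars.isspace rest).length
             + j.toNat + 4 + pvBConsume (List.drop (j.toNat + 2) tl))
    rw [h']
    rw [pvALoop.eq_def]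
    split
    · rename_i heq
      simp only [List.cons.injEq, true_and] at heq
      exact absurd heq (fun hh => hne _ hh)
    · rename_i tl' i' heq
      simp only [List.cons.injEq, true_and] at heq
      rw [← heq]
      rw [show PySem.Chars.find tl ['*', ')'] = j from rfl]
      rw [if_neg hjge]
      rw [ih (i + (rest.length - ('(' :: '*' :: tl).length) + j.toNat + 4)]
      omega
    · rename_i h1 h2
      exact absurd rfl (h2 tl)
  | case4 rest stripped ws hne1 hne2 =>
    intro i
    rw [pvSkipWs_eq]
    show pvALoop (List.dropWhile PySem.Chars.isspace rest)
        (i + (rest.length - (List.dropWhile PySem.Chars.isspace rest).length,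
              List.dropWhile PySem.Chars.isspace rest).1)
      = i + (rest.length - (List.dropWhile PySem.Chars.isspace rest).length)
    rw [pvALoop.eq_def]
    split
    · rename_i heq
      exact absurd heq (fun hh => hne1 _ hh)
    · rename_i tl' hnm heq
      exact absurd heq (fun hh => hne2 _ hh)
    · rfl

-- ===== VERDICT (by name: the statement is the Claim_ definition above) =====
theorem skip_header_comments_spec : Claim_equal_skip_header_comments := by
  intro text _
  unfold Spec_skip_header_comments skip_header_comments skip_header_comments_alt
  simpa using pvALoop_eq_consume text.toList 0
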